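-- pv_equiv track=rewrite | github.com/brighteast99/coding-test-problems | programmers/Summer∕Winter Coding(2019)/멀쩡한 사각형/solution.py | solution
-- ===== SOURCE A (Python) =====
-- def solution(w,h):
--     if h == 1:
--         return 0
--
--     if w == h:
--         return w * h - w
--
--     answer = 0
--     for x in range(w):
--         answer += x * h // w
--     return answer * 2
-- ===== SOURCE B (Python) =====
-- def gcd(a, b):
--     return a if b == 0 else gcd(b, a % b)
--
--
-- def solution(w, h):
--     if w <= 0 or h <= 0:
--         return 0
--     return w * h - w - h + gcd(w, h)
-- ===== Notes on version B (the rewrite author's own statement) =====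
-- stated objective: faster
-- what changed: Replaced the O(w) loop summing x*h//w with the closed form w*h - w - h + gcd(w,h) (Euclid's algorithm), with degenerate non-positive dimensions returning 0.
-- intended difference: On degenerate inputs with w >= 2 and h <= -1 (where A's loop returns a negative garbage value wh-w-h+gcd) or w = h <= -1 (where A returns w*w-w), B returns 0, the intended answer for a grid with a non-positive dimension. — e.g. on solution(2, -1): A returns -2, B returns 0
import Mathlib
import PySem

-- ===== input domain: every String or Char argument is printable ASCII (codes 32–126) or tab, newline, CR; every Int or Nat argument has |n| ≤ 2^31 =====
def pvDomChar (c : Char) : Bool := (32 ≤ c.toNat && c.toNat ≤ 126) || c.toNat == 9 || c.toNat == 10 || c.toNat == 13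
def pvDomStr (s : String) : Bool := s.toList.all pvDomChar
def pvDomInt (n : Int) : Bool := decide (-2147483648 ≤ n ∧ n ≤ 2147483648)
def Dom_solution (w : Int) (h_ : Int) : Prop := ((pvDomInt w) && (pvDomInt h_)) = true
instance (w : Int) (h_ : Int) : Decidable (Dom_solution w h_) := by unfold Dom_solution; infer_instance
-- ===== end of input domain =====

-- B replaces A's O(w) loop over x*h//w with the closed form w*h - w - h + gcd(w,h);
-- B returns 0 for degenerate non-positive dimensions (see D_solution below).

-- ===== PORT A =====
def solution (w : Int) (h_ : Int) : Int :=
  if h_ = 1 then 0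
  else if w = h_ then w * h_ - w
  else ((PySem.List.pyRange 0 w 1).foldl
          (fun answer x => answer + PySem.Int.floordiv (x * h_) w) 0) * 2

-- ===== PORT B =====
-- recursive Euclid from Source B, using Python's % (PySem.Int.mod)
def gcdB (a : Int) (b : Int) : Int :=
  if hb : b = 0 then a else gcdB b (PySem.Int.mod a b)
termination_by b.natAbs
decreasing_by
  rcases lt_trichotomy b 0 with hneg | h0 | hpos
  · have := PySem.Int.mod_neg_bounds a hneg; omega
  · exact absurd h0 hb
  · have h1 := PySem.Int.mod_nonneg a hpos
    have h2 := PySem.Int.mod_lt a hpos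
    omega

def solution_alt (w : Int) (h_ : Int) : Int :=
  if w ≤ 0 ∨ h_ ≤ 0 then 0
  else w * h_ - w - h_ + gcdB w h_

-- ===== PRECONDITION & SPEC =====
-- On degenerate inputs with w ≥ 2 ∧ h ≤ -1 (A's loop returns the negative value w*h-w-h+gcd)
-- or w = h ≤ -1 (A returns w*w-w), B returns 0, the intended answer for a grid with a
-- non-positive dimension.
def D_solution (w : Int) (h_ : Int) : Prop := (2 ≤ w ∧ h_ ≤ -1) ∨ (w = h_ ∧ w ≤ -1)
instance (w : Int) (h_ : Int) : Decidable (D_solution w h_) := by unfold D_solution; infer_instance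

def Spec_solution (w : Int) (h_ : Int) (out : Int) : Prop := ¬ D_solution w h_ → out = solution_alt w h_
instance (w : Int) (h_ : Int) (out : Int) : Decidable (Spec_solution w h_ out) := by unfold Spec_solution; infer_instance

def pvDiffWitness_solution : Int × Int := (2, -1)
def pvDiffWitnessOut_solution : Int × Int := (-2, 0)

-- ===== CLAIM (what is proved, stated in full; the proofs are below) =====
def Claim_unchanged_solution : Prop := ∀ (w : Int) (h_ : Int), Dom_solution w h_ → Spec_solution w h_ (solution w h_)
def Claim_changed_solution : Prop := Dom_solution (pvDiffWitness_solution.1) (pvDiffWitness_solution.2) ∧ D_solution (pvDiffWitness_solution.1) (pvDiffWitness_solution.2) ∧ solution (pvDiffWitness_solution.1) (pvDiffWitness_solution.2) = pvDiffWitnessOut_solution.1 ∧ solution_alt (pvDiffWitness_solution.1) (pvDiffWitness_solution.2) = pvDiffWitnessOut_solution.2 ∧ pvDiffWitnessOut_solution.1 ≠ pvDiffWitnessOut_solution.2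
def Claim_exact_solution : Prop := ∀ (w : Int) (h_ : Int), Dom_solution w h_ → D_solution w h_ → solution w h_ ≠ solution_alt w h_


-- ===== LEMMAS AND PROOFS =====

-- Euclid's loop computes Int.gcd on nonnegative inputs (strong induction on |b|)
theorem gcdB_eq_aux : ∀ (N : ℕ) (a b : Int), b.natAbs ≤ N → 0 ≤ a → 0 ≤ b → gcdB a b = Int.gcd a b := by
  intro N
  induction N with
  | zero =>
    intro a b hN ha hb
    have hb0 : b = 0 := by omega
    subst hb0
    rw [gcdB, dif_pos rfl, Int.gcd_zero_right]
    exact (Int.natAbs_of_nonneg ha).symm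
  | succ N ih =>
    intro a b hN ha hb
    by_cases hb0 : b = 0
    · subst hb0
      rw [gcdB, dif_pos rfl, Int.gcd_zero_right]
      exact (Int.natAbs_of_nonneg ha).symm
    · have hbpos : 0 < b := lt_of_le_of_ne hb (Ne.symm hb0)
      rw [gcdB, dif_neg hb0, PySem.Int.mod_eq_emod_of_pos hbpos]
      have h1 : 0 ≤ a % b := Int.emod_nonneg a hb0
      have h2 : a % b < b := Int.emod_lt_of_pos a hbpos
      rw [ih b (a % b) (by omega) hb h1]
      congr 1
      rw [Int.gcd_comm, Int.gcd_emod]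

theorem gcdB_eq (a b : Int) (ha : 0 ≤ a) (hb : 0 ≤ b) : gcdB a b = Int.gcd a b :=
  gcdB_eq_aux b.natAbs a b le_rfl ha hb

-- Python floor-division pairing: a//b + (-a)//b is 0 or -1 according to divisibility
theorem floordiv_pair (a b : Int) (hb : 0 < b) :
    PySem.Int.floordiv a b + PySem.Int.floordiv (-a) b =
      if b ∣ a then 0 else -1 := by
  have h1 := PySem.Int.floordiv_mul_add_mod a b
  have h1' := PySem.Int.floordiv_mul_add_mod (-a) b
  have h2 := PySem.Int.mod_nonneg a hb
  have h3 := PySem.Int.mod_lt a hb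
  have h2' := PySem.Int.mod_nonneg (-a) hb
  have h3' := PySem.Int.mod_lt (-a) hb
  have hdvd := PySem.Int.mod_eq_zero_iff_dvd a b
  set q := PySem.Int.floordiv a b
  set q' := PySem.Int.floordiv (-a) b
  set r := PySem.Int.mod a b
  set r' := PySem.Int.mod (-a) b
  have hsum : (q + q') * b = -(r + r') := by ring_nf; ring_nf at h1 h1'; linarith
  split_ifs with hd
  · have hr : r = 0 := hdvd.mpr hd
    rcases lt_trichotomy (q + q') 0 with hs | hs | hs
    · exfalso
      have : (q + q') * b ≤ -1 * b := mul_le_mul_of_nonneg_right (by omega) (le_of_lt hb)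
      linarith
    · exact hs
    · exfalso
      have : 1 * b ≤ (q + q') * b := mul_le_mul_of_nonneg_right (by omega) (le_of_lt hb)
      linarith
  · have hr : r ≠ 0 := fun h => hd (hdvd.mp h)
    have hr1 : 1 ≤ r := by omega
    rcases lt_trichotomy (q + q') (-1) with hs | hs | hs
    · exfalso
      have : (q + q') * b ≤ -2 * b := mul_le_mul_of_nonneg_right (by omega) (le_of_lt hb)
      linarith
    · exact hs
    · exfalso
      have : 0 * b ≤ (q + q') * b := mul_le_mul_of_nonneg_right (by omega) (le_of_lt hb)
      linarith

-- counting multiples: #{k < n : n | k*m} = gcd n m (over Nat)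
theorem card_filter_dvd (n m : ℕ) (hn : 1 ≤ n) :
    ((Finset.range n).filter (fun k => n ∣ k * m)).card = Nat.gcd n m := by
  have hd0 : 0 < Nat.gcd n m := Nat.gcd_pos_of_pos_left m (by omega)
  have cop0 := Nat.coprime_div_gcd_div_gcd (m := n) (n := m) hd0
  obtain ⟨n₁, hn1⟩ : Nat.gcd n m ∣ n := Nat.gcd_dvd_left n m
  obtain ⟨m₁, hm1⟩ : Nat.gcd n m ∣ m := Nat.gcd_dvd_right n m
  generalize hg : Nat.gcd n m = g at hd0 cop0 hn1 hm1 ⊢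
  have hn10 : 0 < n₁ := by
    have hne : n₁ ≠ 0 := by
      rintro rfl
      rw [Nat.mul_zero] at hn1
      omega
    omega
  have e1 : n / g = n₁ := by rw [hn1]; exact Nat.mul_div_cancel_left n₁ hd0
  have e2 : m / g = m₁ := by rw [hm1]; exact Nat.mul_div_cancel_left m₁ hd0
  rw [e1, e2] at cop0
  have hiff : ∀ k, (n ∣ k * m ↔ n₁ ∣ k) := by
    intro k
    rw [hn1, hm1]
    constructor
    · intro h
      have h' : g * n₁ ∣ g * (k * m₁) := by
        rwa [show g * (k * m₁) = k * (g * m₁) by ring]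
      exact cop0.dvd_of_dvd_mul_right ((Nat.mul_dvd_mul_iff_left hd0).mp h')
    · rintro ⟨t, rfl⟩
      exact ⟨t * m₁, by ring⟩
  have hfe := Finset.filter_congr (s := Finset.range n) (fun k _ => hiff k)
  rw [hfe]
  have himg : (Finset.range n).filter (fun k => n₁ ∣ k) =
      (Finset.range g).image (fun t => t * n₁) := by
    ext a
    simp only [Finset.mem_filter, Finset.mem_range, Finset.mem_image]
    constructor
    · rintro ⟨hlt, t, rfl⟩
      refine ⟨t, ?_, (mul_comm n₁ t).symm⟩
      rw [hn1] at hlt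
      have h2 : t * n₁ < g * n₁ := by
        calc t * n₁ = n₁ * t := mul_comm t n₁
        _ < g * n₁ := hlt
      exact Nat.lt_of_mul_lt_mul_right h2
    · rintro ⟨t, htd, rfl⟩
      refine ⟨?_, ⟨t, mul_comm t n₁⟩⟩
      rw [hn1]
      exact (Nat.mul_lt_mul_right hn10).mpr htd
  rw [himg,
    Finset.card_image_of_injective _ (fun x y hxy => Nat.eq_of_mul_eq_mul_right hn10 hxy),
    Finset.card_range]

-- the summand of A's loop, as a function of the Nat loop index
def pvF (w : Int) (h : Int) (k : ℕ) : ℤ := PySem.Int.floordiv ((k : ℤ) * h) w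

-- the closed form of A's loop, for w ≥ 1 and arbitrary h
theorem loop_closed_form (w h : Int) (hw : 1 ≤ w) :
    ((PySem.List.pyRange 0 w 1).foldl
        (fun answer x => answer + PySem.Int.floordiv (x * h) w) 0) * 2 =
      w * h - w - h + Int.gcd w h := by
  have hwn : ((w.toNat : ℤ)) = w := Int.toNat_of_nonneg (by omega)
  generalize hn : w.toNat = n at hwn
  subst hwn
  have hw0 : (0 : ℤ) < (n : ℤ) := by exact_mod_cast hw
  have hn1 : 1 ≤ n := by exact_mod_cast hw
  have hloop : (PySem.List.pyRange 0 (n : ℤ) 1).foldl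
      (fun answer x => answer + PySem.Int.floordiv (x * h) (n : ℤ)) 0
      = ∑ k ∈ Finset.range n, pvF (n : ℤ) h k := by
    rw [PySem.List.pyRange_one, PySem.List.foldl_add, List.map_map]
    have h2 : ((n : ℤ) - 0).toNat = n := by omega
    rw [h2]
    have h3 : ((fun x => PySem.Int.floordiv (x * h) (n : ℤ)) ∘ fun k : ℕ => (0 : ℤ) + ↑k)
        = pvF (n : ℤ) h := by
      funext k
      simp [pvF]
    rw [h3, zero_add]
    exact Int.neg_inj.mp rfl
  have hF0 : pvF (n : ℤ) h 0 = 0 := by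
    have hz : ((0 : ℕ) : ℤ) * h = 0 := by push_cast; ring
    rw [pvF, hz, PySem.Int.floordiv_eq_iff_of_pos hw0]
    constructor <;> nlinarith
  have hFn : pvF (n : ℤ) h n = h := by
    rw [pvF, PySem.Int.floordiv_eq_iff_of_pos hw0]
    constructor <;> nlinarith
  have hrefl : ∑ k ∈ Finset.range n, pvF (n : ℤ) h (n - k)
      = (∑ k ∈ Finset.range n, pvF (n : ℤ) h k) + h := by
    have h1 := Finset.sum_range_reflect (fun j => pvF (n : ℤ) h (j + 1)) n
    have h2 : ∀ j ∈ Finset.range n, pvF (n : ℤ) h (n - 1 - j + 1) = pvF (n : ℤ) h (n - j) := by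
      intro j hj
      simp only [Finset.mem_range] at hj
      congr 1
      omega
    rw [Finset.sum_congr rfl h2] at h1
    have h3 := Finset.sum_range_succ (pvF (n : ℤ) h) n
    have h4 := Finset.sum_range_succ' (pvF (n : ℤ) h) n
    rw [hF0] at h4
    rw [hFn] at h3
    rw [h1]
    linarith [h3, h4]
  have shift : ∀ a : ℤ, PySem.Int.floordiv (a + h * (n : ℤ)) (n : ℤ)
      = PySem.Int.floordiv a (n : ℤ) + h := by
    intro a
    have hq := PySem.Int.floordiv_mul_add_mod a (n : ℤ)
    have hq2 := PySem.Int.mod_nonneg a hw0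
    have hq3 := PySem.Int.mod_lt a hw0
    rw [PySem.Int.floordiv_eq_iff_of_pos hw0]
    constructor <;> nlinarith
  have pair : ∀ k ∈ Finset.range n, pvF (n : ℤ) h k + pvF (n : ℤ) h (n - k)
      = h - 1 + (if (n : ℤ) ∣ (k : ℤ) * h then 1 else 0) := by
    intro k hk
    simp only [Finset.mem_range] at hk
    have hkn : ((n - k : ℕ) : ℤ) * h = -((k : ℤ) * h) + h * (n : ℤ) := by
      push_cast [Nat.cast_sub (le_of_lt hk)]
      ring
    have hp := floordiv_pair ((k : ℤ) * h) (n : ℤ) hw0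
    rw [pvF, pvF, hkn, shift]
    by_cases hd : (n : ℤ) ∣ (k : ℤ) * h
    · rw [if_pos hd] at hp ⊢
      linarith
    · rw [if_neg hd] at hp ⊢
      linarith
  have hcard : (((Finset.range n).filter (fun k : ℕ => (n : ℤ) ∣ (k : ℤ) * h)).card : ℤ)
      = Int.gcd (n : ℤ) h := by
    have hiff2 : ∀ k : ℕ, ((n : ℤ) ∣ (k : ℤ) * h ↔ n ∣ k * h.natAbs) := by
      intro k
      rw [Int.ofNat_dvd_left, Int.natAbs_mul, Int.natAbs_natCast]
    have hfe := Finset.filter_congr (s := Finset.range n) (fun k _ => hiff2 k)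
    rw [hfe, card_filter_dvd n h.natAbs hn1]
    simp [Int.gcd]
  have hsum : ∑ k ∈ Finset.range n, (pvF (n : ℤ) h k + pvF (n : ℤ) h (n - k))
      = (n : ℤ) * (h - 1)
        + (((Finset.range n).filter (fun k : ℕ => (n : ℤ) ∣ (k : ℤ) * h)).card : ℤ) := by
    rw [Finset.sum_congr rfl pair, Finset.sum_add_distrib, Finset.sum_const, Finset.card_range,
      Finset.sum_boole, nsmul_eq_mul]
  rw [Finset.sum_add_distrib, hrefl, hcard] at hsum
  rw [hloop]
  linarith [hsum]

-- ===== VERDICT (by name: the statement is the Claim_ definition above) =====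
theorem solution_spec : Claim_unchanged_solution := by
  intro w h hdom hnD
  unfold D_solution at hnD
  show solution w h = solution_alt w h
  unfold solution solution_alt
  by_cases hw : w ≤ 0
  · -- w ≤ 0: both sides are 0 (A's loop is empty; the w = h branch forces w = 0)
    rw [if_pos (Or.inl hw)]
    by_cases h1 : h = 1
    · rw [if_pos h1]
    · rw [if_neg h1]
      by_cases h2 : w = h
      · rw [if_pos h2]
        have hw0 : w = 0 := by omega
        rw [hw0]
        ring
      · rw [if_neg h2, PySem.List.pyRange_one]
        have h3 : (w - 0).toNat = 0 := by omega
        rw [h3]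
        simp
  · have hw1 : 1 ≤ w := by omega
    by_cases hh : h ≤ 0
    · -- w ≥ 1, h ≤ 0, and ¬(2 ≤ w ∧ h ≤ -1): w = 1 or h = 0; both sides are 0
      rw [if_pos (Or.inr hh), if_neg (by omega : ¬h = 1), if_neg (by omega : ¬w = h),
        loop_closed_form w h hw1]
      rcases (by omega : w = 1 ∨ h = 0) with h1 | h1
      · subst h1
        rw [Int.one_gcd]
        norm_num
      · subst h1
        rw [Int.gcd_zero_right]
        have hna := Int.natAbs_of_nonneg (by omega : (0 : ℤ) ≤ w)
        omega
    · -- w ≥ 1, h ≥ 1: closed form everywhere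
      rw [if_neg (by omega : ¬(w ≤ 0 ∨ h ≤ 0)), gcdB_eq w h (by omega) (by omega)]
      by_cases h1 : h = 1
      · rw [if_pos h1]
        subst h1
        rw [Int.gcd_one_right]
        norm_num
      · rw [if_neg h1]
        by_cases h2 : w = h
        · rw [if_pos h2]
          subst h2
          rw [Int.gcd_self]
          have hna := Int.natAbs_of_nonneg (by omega : (0 : ℤ) ≤ w)
          have hcast : ((w.natAbs : ℤ)) = w := hna
          linarith
        · rw [if_neg h2]
          exact loop_closed_form w h hw1

theorem solution_changed : Claim_changed_solution := by
  unfold Claim_changed_solution; decide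

theorem solution_tight : Claim_exact_solution := by
  intro w h hdom hD
  unfold D_solution at hD
  unfold solution solution_alt
  rcases hD with ⟨hw, hh⟩ | ⟨hwh, hw⟩
  · -- w ≥ 2, h ≤ -1: A = w*h - w - h + gcd < 0, B = 0
    rw [if_neg (by omega), if_neg (by omega), if_pos (Or.inr (by omega))]
    rw [loop_closed_form w h (by omega)]
    have h1 : Int.gcd w h ≤ h.natAbs :=
      Nat.le_of_dvd (by omega) (Nat.gcd_dvd_right w.natAbs h.natAbs)
    have hgle : (Int.gcd w h : ℤ) ≤ -h := by omega
    have hprod : (w - 2) * h ≤ 0 :=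
      mul_nonpos_of_nonneg_of_nonpos (by omega) (by omega)
    have hwh2 : w * h ≤ 2 * h := by nlinarith
    intro hcontra
    linarith
  · -- w = h ≤ -1: A = w*w - w > 0, B = 0
    rw [if_neg (by omega), if_pos hwh, if_pos (Or.inl (by omega))]
    subst hwh
    have hpos : 0 < w * w := mul_pos_of_neg_of_neg (by omega) (by omega)
    intro hcontra
    linarith
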